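-- pv_equiv track=rewrite | github.com/StephenBo-China/first_second_third_mst | assignment4.py | dfs
-- ===== SOURCE A (Python) =====
-- def dfs(u, v, mst, visited, path, res, G):
--     '''
--     to find all the weight of edges in path u2v
--     '''
--     if u == v:
--         res.extend(path[:])
--         return
--     visited[u] = True
--     for val in mst[u]:
--         if not visited[val]:
--             visited[u]
--             path.append(G[u][val])
--             dfs(val, v, mst, visited, path, res, G)
--             path.pop()
--     visited[u] = False
--     return res
-- ===== SOURCE B (Python) =====
-- def dfs(u, v, mst, visited, path, res, G):
--     if u == v:
--         res.extend(path[:])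
--         return None
--     def paths(node, blocked, acc):
--         blocked = blocked | {node}
--         out = []
--         for val in mst[node]:
--             if val not in blocked and not visited[val]:
--                 w = G[node][val]
--                 if val == v:
--                     out.append(acc + [w])
--                 else:
--                     out.extend(paths(val, blocked, acc + [w]))
--         return out
--     for p in paths(u, frozenset(), list(path)):
--         res.extend(p)
--     return res
-- ===== Notes on version B (the rewrite author's own statement) =====
-- stated objective: alternative
-- what changed: B replaces A's mutate-and-backtrack DFS (marking visited[u]=True, appending/popping a shared path, extending a shared res at each hit) by a pure recursive path enumerator that threads an immutable blocked set and accumulator and returns the list of weight-paths, which is then appended to res once; B does not mutate visited (return-value equivalence only).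
import Mathlib
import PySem

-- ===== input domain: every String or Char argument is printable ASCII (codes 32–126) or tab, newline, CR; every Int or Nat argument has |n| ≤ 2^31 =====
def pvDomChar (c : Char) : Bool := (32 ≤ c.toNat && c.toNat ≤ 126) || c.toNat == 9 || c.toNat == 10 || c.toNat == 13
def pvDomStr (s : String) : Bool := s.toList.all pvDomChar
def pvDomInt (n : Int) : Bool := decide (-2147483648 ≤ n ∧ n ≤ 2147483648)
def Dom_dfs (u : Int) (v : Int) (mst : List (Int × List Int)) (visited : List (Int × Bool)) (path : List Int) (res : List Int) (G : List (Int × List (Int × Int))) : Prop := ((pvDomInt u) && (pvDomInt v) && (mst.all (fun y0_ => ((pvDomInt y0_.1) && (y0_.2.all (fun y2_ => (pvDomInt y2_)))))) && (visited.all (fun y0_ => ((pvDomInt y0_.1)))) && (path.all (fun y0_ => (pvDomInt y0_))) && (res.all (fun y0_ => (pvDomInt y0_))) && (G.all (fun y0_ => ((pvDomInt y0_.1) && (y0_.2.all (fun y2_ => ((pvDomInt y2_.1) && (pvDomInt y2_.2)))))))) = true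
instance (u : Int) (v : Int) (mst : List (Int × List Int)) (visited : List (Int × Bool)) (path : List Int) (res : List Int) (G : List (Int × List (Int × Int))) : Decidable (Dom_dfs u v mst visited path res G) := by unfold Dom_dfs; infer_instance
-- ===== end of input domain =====

-- B re-implements A's mutate-and-backtrack DFS as a pure path enumerator (immutable blocked set, no
-- visited/path mutation); equivalence is about the RETURN value only (A's net in-place effect,
-- setting visited[u] to False, is not performed by B).

-- ===== PORT A =====
-- A's recursion is total on Pre_ inputs; fuel (one unit per recursive call; visited.length + 1 is
-- enough, since each call enters a distinct not-yet-visited key of visited) is only a totality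
-- device. Threaded state = (visited, path, res); A discards the return value of inner calls, so
-- only the state is threaded, and the top-level wrapper returns None or the final res.
def goA (mst : PySem.Dict Int (List Int)) (G : PySem.Dict Int (List (Int × Int))) (v : Int) :
    Nat → Int → PySem.Dict Int Bool → List Int → List Int →
    PySem.Dict Int Bool × List Int × List Int
  | 0, u, vis, path, res =>
      if u = v then (vis, path, res ++ path) else (vis, path, res)
  | (fuel+1), u, vis, path, res =>
      if u = v then
        -- res.extend(path[:]); return
        (vis, path, res ++ path)
      else
        -- visited[u] = True
        let vis1 := vis.insert u true
        -- for val in mst[u]: if not visited[val]: path.append(G[u][val]); dfs(...); path.pop()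
        let r := (mst.getD u []).foldl (fun st val =>
            if PySem.Dict.getD st.1 val false = false then
              let w := (PySem.Dict.mk (G.getD u [])).getD val 0
              let r' := goA mst G v fuel val st.1 (st.2.1 ++ [w]) st.2.2
              (r'.1, r'.2.1.dropLast, r'.2.2)
            else st) (vis1, path, res)
        -- visited[u] = False; return res
        (r.1.insert u false, r.2.1, r.2.2)

def dfs (u : Int) (v : Int) (mst : List (Int × List Int)) (visited : List (Int × Bool)) (path : List Int) (res : List Int) (G : List (Int × List (Int × Int))) : Option (List Int) :=
  if u = v then
    none  -- Python: res.extend(path[:]); return  → returns None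
  else
    some (goA (PySem.Dict.mk mst) (PySem.Dict.mk G) v (visited.length + 1) u
            (PySem.Dict.mk visited) path res).2.2

-- ===== PORT B =====
-- paths(node, blocked, acc): pure enumeration of the weight-paths from node to v; same fuel device.
def pathsB (mst : PySem.Dict Int (List Int)) (G : PySem.Dict Int (List (Int × Int)))
    (v : Int) (vis0 : PySem.Dict Int Bool) :
    Nat → Int → PySem.Set Int → List Int → List (List Int)
  | 0, _, _, _ => []
  | (fuel+1), node, blocked, acc =>
      let blocked' := PySem.Set.add blocked node
      (mst.getD node []).foldl (fun out val =>
          if PySem.Set.contains blocked' val = false ∧ PySem.Dict.getD vis0 val false = false then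
            let w := (PySem.Dict.mk (G.getD node [])).getD val 0
            if val = v then out ++ [acc ++ [w]]
            else out ++ pathsB mst G v vis0 fuel val blocked' (acc ++ [w])
          else out) []

def dfs_alt (u : Int) (v : Int) (mst : List (Int × List Int)) (visited : List (Int × Bool)) (path : List Int) (res : List Int) (G : List (Int × List (Int × Int))) : Option (List Int) :=
  if u = v then none
  else
    some ((pathsB (PySem.Dict.mk mst) (PySem.Dict.mk G) v (PySem.Dict.mk visited)
            (visited.length + 1) u PySem.Set.empty path).foldl (fun r p => r ++ p) res)

-- ===== PRECONDITION & SPEC =====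
-- Helpers for Pre_: the set of nodes A's search calls itself on, as a standard graph closure
-- (NOT A's algorithm: no path, no res, no marking/unmarking — just reachability from u through
-- initially-unvisited nodes, stopping at v, optionally avoiding one node).
-- One expansion step of the closure.
def pvStep (mst : List (Int × List Int)) (visited : List (Int × Bool)) (u : Int) (v : Int)
    (avoid : List Int) (s : List Int) : List Int :=
  s.foldl (fun acc n =>
    if n = v then acc
    else ((PySem.Dict.mk mst).getD n []).foldl (fun acc2 m =>
      if m ≠ u ∧ m ∉ avoid ∧ (PySem.Dict.mk visited).getD m false = false ∧ m ∉ acc2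
      then acc2 ++ [m] else acc2) acc) s

-- Nodes n with a simple path u → n whose non-initial nodes are initially unvisited, avoid v as an
-- interior node and avoid every node of `avoid` (iterated to a fixpoint: each useful step adds a node).
def pvReach (mst : List (Int × List Int)) (visited : List (Int × Bool)) (u : Int) (v : Int)
    (avoid : List Int) : List Int :=
  if u ∈ avoid then []
  else (pvStep mst visited u v avoid)^[mst.foldl (fun a p => a + p.2.length) (mst.length + 1)] [u]

-- Pre_ excludes EXACTLY the inputs on which the Python A raises KeyError: some lookup it performs —
-- mst[n] at a reached node n, visited[val] at a neighbour never yet inserted (only u is inserted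
-- unconditionally), or G[n][val] when the neighbour test passes on some call stack (= some simple
-- live path to n avoiding val) — hits a missing key. On every input admitted by Pre_, A returns.
def Pre_dfs (u : Int) (v : Int) (mst : List (Int × List Int)) (visited : List (Int × Bool)) (path : List Int) (res : List Int) (G : List (Int × List (Int × Int))) : Prop :=
  u = v ∨
    ∀ n ∈ pvReach mst visited u v [], n ≠ v →
      (PySem.Dict.mk mst).contains n = true ∧
      ∀ val ∈ (PySem.Dict.mk mst).getD n [],
        ((PySem.Dict.mk visited).contains val = true ∨ val = u) ∧
        (((PySem.Dict.mk visited).getD val false = false ∧ n ∈ pvReach mst visited u v [val]) →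
          (PySem.Dict.mk G).contains n = true ∧
          (PySem.Dict.mk ((PySem.Dict.mk G).getD n [])).contains val = true)
instance (u : Int) (v : Int) (mst : List (Int × List Int)) (visited : List (Int × Bool)) (path : List Int) (res : List Int) (G : List (Int × List (Int × Int))) : Decidable (Pre_dfs u v mst visited path res G) := by unfold Pre_dfs; infer_instance

def pvWitness_dfs : Int × Int × (List (Int × List Int)) × (List (Int × Bool)) × List Int × List Int × (List (Int × List (Int × Int))) :=
  (0, 1, [(0, [1]), (1, [0])], [(0, false), (1, false)], [], [], [(0, [(1, 7)]), (1, [(0, 7)])])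

def Spec_dfs (u : Int) (v : Int) (mst : List (Int × List Int)) (visited : List (Int × Bool)) (path : List Int) (res : List Int) (G : List (Int × List (Int × Int))) (out : Option (List Int)) : Prop := out = dfs_alt u v mst visited path res G
instance (u : Int) (v : Int) (mst : List (Int × List Int)) (visited : List (Int × Bool)) (path : List Int) (res : List Int) (G : List (Int × List (Int × Int))) (out : Option (List Int)) : Decidable (Spec_dfs u v mst visited path res G out) := by unfold Spec_dfs; infer_instance

-- ===== CLAIM (what is proved, stated in full; the proofs are below) =====
def Claim_equal_dfs : Prop := ∀ (u : Int) (v : Int) (mst : List (Int × List Int)) (visited : List (Int × Bool)) (path : List Int) (res : List Int) (G : List (Int × List (Int × Int))), Dom_dfs u v mst visited path res G → Pre_dfs u v mst visited path res G → Spec_dfs u v mst visited path res G (dfs u v mst visited path res G)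

-- ===== LEMMAS AND PROOFS =====
-- The ports are in fact equal on ALL inputs (both read missing keys through getD defaults), so the
-- proof does not need Pre_; Pre_'s job is to delimit where the Python A actually returns.

-- res.extend over a list of paths = res ++ their concatenation
theorem foldl_extend (L : List (List Int)) (r : List Int) :
    L.foldl (fun a b => a ++ b) r = r ++ L.flatMap id := by
  induction L generalizing r with
  | nil => simp
  | cons x L ih => simp [List.foldl_cons, ih, List.append_assoc]

-- the out-accumulating fold of pathsB is a flatMap
theorem foldl_out {α β : Type} (f : α → List β) (L : List α) (init : List β) :
    L.foldl (fun out val => out ++ f val) init = init ++ L.flatMap f := by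
  induction L generalizing init with
  | nil => simp
  | cons x L ih => simp [List.foldl_cons, ih, List.append_assoc]

theorem pathsB_succ (mst : PySem.Dict Int (List Int)) (G : PySem.Dict Int (List (Int × Int)))
    (v : Int) (vis0 : PySem.Dict Int Bool) (fuel : Nat) (node : Int)
    (blocked : PySem.Set Int) (acc : List Int) :
    pathsB mst G v vis0 (fuel+1) node blocked acc
      = (mst.getD node []).flatMap (fun val =>
          if PySem.Set.contains (PySem.Set.add blocked node) val = false
              ∧ PySem.Dict.getD vis0 val false = false then
            (if val = v then [acc ++ [(PySem.Dict.mk (G.getD node [])).getD val 0]]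
             else pathsB mst G v vis0 fuel val (PySem.Set.add blocked node)
                    (acc ++ [(PySem.Dict.mk (G.getD node [])).getD val 0]))
          else []) := by
  have h : (fun (out : List (List Int)) (val : Int) =>
      if PySem.Set.contains (PySem.Set.add blocked node) val = false
          ∧ PySem.Dict.getD vis0 val false = false then
        (if val = v then out ++ [acc ++ [(PySem.Dict.mk (G.getD node [])).getD val 0]]
         else out ++ pathsB mst G v vis0 fuel val (PySem.Set.add blocked node)
                (acc ++ [(PySem.Dict.mk (G.getD node [])).getD val 0]))
       else out)
      = (fun (out : List (List Int)) (val : Int) =>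
      out ++ (if PySem.Set.contains (PySem.Set.add blocked node) val = false
          ∧ PySem.Dict.getD vis0 val false = false then
        (if val = v then [acc ++ [(PySem.Dict.mk (G.getD node [])).getD val 0]]
         else pathsB mst G v vis0 fuel val (PySem.Set.add blocked node)
                (acc ++ [(PySem.Dict.mk (G.getD node [])).getD val 0]))
       else [])) := by
    funext out val
    split_ifs <;> simp
  show (mst.getD node []).foldl _ [] = _
  rw [h, foldl_out]
  simp

-- Main invariant: goA preserves the getD-view of visited (off u unconditionally, at u when it was
-- false), restores path, and appends to res exactly the concatenation of B's enumerated paths,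
-- provided vis's view equals the original visited or-ed with the blocked set.
theorem goA_spec (mst : PySem.Dict Int (List Int)) (G : PySem.Dict Int (List (Int × Int)))
    (v : Int) (vis0 : PySem.Dict Int Bool) :
    ∀ (fuel : Nat) (u : Int) (vis : PySem.Dict Int Bool) (blocked : PySem.Set Int)
      (path res : List Int),
      (∀ k, vis.getD k false = (vis0.getD k false || PySem.Set.contains blocked k)) →
      (∀ k, k ≠ u → (goA mst G v fuel u vis path res).1.getD k false = vis.getD k false)
      ∧ (vis.getD u false = false → (goA mst G v fuel u vis path res).1.getD u false = false)
      ∧ (u = v → (goA mst G v fuel u vis path res).1 = vis)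
      ∧ (goA mst G v fuel u vis path res).2.1 = path
      ∧ (goA mst G v fuel u vis path res).2.2
          = res ++ (if u = v then [path]
                    else pathsB mst G v vis0 fuel u blocked path).flatMap id := by
  intro fuel
  induction fuel with
  | zero =>
    intro u vis blocked path res _henc
    by_cases huv : u = v <;> simp [goA, huv, pathsB]
  | succ fuel ih =>
    intro u vis blocked path res henc
    by_cases huv : u = v
    · simp [goA, huv]
    · have henc1 : ∀ k, (vis.insert u true).getD k false
          = (vis0.getD k false || PySem.Set.contains (PySem.Set.add blocked u) k) := by
        intro k
        rw [PySem.Dict.getD_insert]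
        by_cases hk : k = u
        · simp [hk]
        · have : PySem.Set.contains (PySem.Set.add blocked u) k
              = PySem.Set.contains blocked k := by
            cases hb : PySem.Set.contains blocked k with
            | true =>
              rw [PySem.Set.contains_iff] at hb ⊢
              rw [PySem.Set.mem_add]; exact Or.inl hb
            | false =>
              by_contra hne
              have ht : PySem.Set.contains (PySem.Set.add blocked u) k = true := by
                cases hx : PySem.Set.contains (PySem.Set.add blocked u) k
                · rw [hx] at hne; exact absurd rfl hne
                · rfl
              rw [PySem.Set.contains_iff, PySem.Set.mem_add] at ht
              rcases ht with h' | h'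
              · rw [← PySem.Set.contains_iff] at h'; rw [h'] at hb; cases hb
              · exact hk h'
          rw [if_neg hk, henc k, this]
      -- loop invariant over the adjacency list
      have loop : ∀ (L : List Int) (vis2 : PySem.Dict Int Bool) (res2 : List Int),
          (∀ k, vis2.getD k false
            = (vis0.getD k false || PySem.Set.contains (PySem.Set.add blocked u) k)) →
          (∀ k, (L.foldl (fun st val =>
              if PySem.Dict.getD st.1 val false = false then
                let w := (PySem.Dict.mk (G.getD u [])).getD val 0
                let r' := goA mst G v fuel val st.1 (st.2.1 ++ [w]) st.2.2
                (r'.1, r'.2.1.dropLast, r'.2.2)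
              else st) (vis2, path, res2)).1.getD k false = vis2.getD k false)
          ∧ (L.foldl (fun st val =>
              if PySem.Dict.getD st.1 val false = false then
                let w := (PySem.Dict.mk (G.getD u [])).getD val 0
                let r' := goA mst G v fuel val st.1 (st.2.1 ++ [w]) st.2.2
                (r'.1, r'.2.1.dropLast, r'.2.2)
              else st) (vis2, path, res2)).2.1 = path
          ∧ (L.foldl (fun st val =>
              if PySem.Dict.getD st.1 val false = false then
                let w := (PySem.Dict.mk (G.getD u [])).getD val 0
                let r' := goA mst G v fuel val st.1 (st.2.1 ++ [w]) st.2.2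
                (r'.1, r'.2.1.dropLast, r'.2.2)
              else st) (vis2, path, res2)).2.2
            = res2 ++ (L.flatMap (fun val =>
                if PySem.Set.contains (PySem.Set.add blocked u) val = false
                    ∧ PySem.Dict.getD vis0 val false = false then
                  (if val = v then [path ++ [(PySem.Dict.mk (G.getD u [])).getD val 0]]
                   else pathsB mst G v vis0 fuel val (PySem.Set.add blocked u)
                          (path ++ [(PySem.Dict.mk (G.getD u [])).getD val 0]))
                else [])).flatMap id := by
        intro L
        induction L with
        | nil => intro vis2 res2 _henc2; simp
        | cons val L ihL =>
          intro vis2 res2 henc2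
          by_cases hcond : PySem.Dict.getD vis2 val false = false
          · -- not visited[val]: recursive call on val
            obtain ⟨hv1, hv2, _hv3, hp, hr⟩ := ih val vis2 (PySem.Set.add blocked u)
              (path ++ [(PySem.Dict.mk (G.getD u [])).getD val 0]) res2 henc2
            have hview : ∀ k, (goA mst G v fuel val vis2
                (path ++ [(PySem.Dict.mk (G.getD u [])).getD val 0]) res2).1.getD k false
                = vis2.getD k false := by
              intro k
              by_cases hk : k = val
              · subst hk; rw [hv2 hcond, hcond]
              · exact hv1 k hk
            have henc3 : ∀ k, (goA mst G v fuel val vis2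
                (path ++ [(PySem.Dict.mk (G.getD u [])).getD val 0]) res2).1.getD k false
                = (vis0.getD k false || PySem.Set.contains (PySem.Set.add blocked u) k) := by
              intro k; rw [hview k]; exact henc2 k
            have hcond' : PySem.Set.contains (PySem.Set.add blocked u) val = false
                ∧ PySem.Dict.getD vis0 val false = false := by
              have hh := henc2 val
              rw [hcond] at hh
              constructor
              · cases hb : PySem.Set.contains (PySem.Set.add blocked u) val
                · rfl
                · rw [hb] at hh; simp at hh
              · cases hb : PySem.Dict.getD vis0 val false
                · rfl
                · rw [hb] at hh; simp at hh
            obtain ⟨sv, sp, sr⟩ := ihL (goA mst G v fuel val vis2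
                (path ++ [(PySem.Dict.mk (G.getD u [])).getD val 0]) res2).1
              (goA mst G v fuel val vis2
                (path ++ [(PySem.Dict.mk (G.getD u [])).getD val 0]) res2).2.2 henc3
            refine ⟨?_, ?_, ?_⟩
            · intro k
              simp only [List.foldl_cons, if_pos hcond, hp, List.dropLast_concat]
              rw [sv k, hview k]
            · simp only [List.foldl_cons, if_pos hcond, hp, List.dropLast_concat]
              exact sp
            · simp only [List.foldl_cons, if_pos hcond, hp, List.dropLast_concat]
              rw [sr, hr, List.flatMap_cons, if_pos hcond']
              by_cases hvv : val = v <;>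
                simp [hvv, List.append_assoc]
          · -- visited[val] true: both sides skip
            have hcond' : ¬ (PySem.Set.contains (PySem.Set.add blocked u) val = false
                ∧ PySem.Dict.getD vis0 val false = false) := by
              rintro ⟨h1, h2⟩
              have hh := henc2 val
              rw [h1, h2] at hh
              simp at hh
              exact hcond hh
            obtain ⟨sv, sp, sr⟩ := ihL vis2 res2 henc2
            refine ⟨?_, ?_, ?_⟩
            · intro k
              simp only [List.foldl_cons, if_neg hcond]
              exact sv k
            · simp only [List.foldl_cons, if_neg hcond]
              exact sp
            · simp only [List.foldl_cons, if_neg hcond]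
              rw [sr, List.flatMap_cons, if_neg hcond']
              simp
      obtain ⟨lv, lpth, lres⟩ := loop (mst.getD u []) (vis.insert u true) res henc1
      have hgoal : goA mst G v (fuel+1) u vis path res
          = (((mst.getD u []).foldl (fun st val =>
              if PySem.Dict.getD st.1 val false = false then
                let w := (PySem.Dict.mk (G.getD u [])).getD val 0
                let r' := goA mst G v fuel val st.1 (st.2.1 ++ [w]) st.2.2
                (r'.1, r'.2.1.dropLast, r'.2.2)
              else st) (vis.insert u true, path, res)).1.insert u false,
            ((mst.getD u []).foldl (fun st val =>
              if PySem.Dict.getD st.1 val false = false then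
                let w := (PySem.Dict.mk (G.getD u [])).getD val 0
                let r' := goA mst G v fuel val st.1 (st.2.1 ++ [w]) st.2.2
                (r'.1, r'.2.1.dropLast, r'.2.2)
              else st) (vis.insert u true, path, res)).2.1,
            ((mst.getD u []).foldl (fun st val =>
              if PySem.Dict.getD st.1 val false = false then
                let w := (PySem.Dict.mk (G.getD u [])).getD val 0
                let r' := goA mst G v fuel val st.1 (st.2.1 ++ [w]) st.2.2
                (r'.1, r'.2.1.dropLast, r'.2.2)
              else st) (vis.insert u true, path, res)).2.2) := by
        simp only [goA, if_neg huv]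
      refine ⟨?_, ?_, fun h => absurd h huv, ?_, ?_⟩
      · intro k hk
        rw [hgoal]
        simp only [PySem.Dict.getD_insert, if_neg hk]
        rw [lv k, PySem.Dict.getD_insert, if_neg hk]
      · intro _
        rw [hgoal]
        simp
      · rw [hgoal]; exact lpth
      · rw [hgoal]
        simp only [if_neg huv]
        rw [lres, pathsB_succ]

-- the blocked set starts empty at the top level
theorem enc_empty (vis0 : PySem.Dict Int Bool) :
    ∀ k : Int, vis0.getD k false
      = (vis0.getD k false || PySem.Set.contains PySem.Set.empty k) := by
  intro k
  simp [PySem.Set.empty, PySem.Set.contains]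

-- ===== VERDICT (by name: the statement is the Claim_ definition above) =====
theorem dfs_spec : Claim_equal_dfs := by
  intro u v mst visited path res G _hdom _hpre
  unfold Spec_dfs dfs dfs_alt
  by_cases huv : u = v
  · simp [huv]
  · simp only [if_neg huv]
    obtain ⟨_, _, _, _, hres⟩ := goA_spec (PySem.Dict.mk mst) (PySem.Dict.mk G) v
      (PySem.Dict.mk visited) (visited.length + 1) u (PySem.Dict.mk visited)
      PySem.Set.empty path res (enc_empty (PySem.Dict.mk visited))
    rw [hres, if_neg huv, foldl_extend]
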